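-- pv_equiv track=rewrite | github.com/Pradip19861/DSA | Accenture/reversestring.py | reversechar
-- ===== SOURCE A (Python) =====
-- def reversechar(s):
--     if len(s) < 2:
--         return s
--     result = []
--     i = 0
--     while i < len(s) - 1:
--         if s[i] != s[i + 1]:
--             result.append(s[i])
--         i += 1
--     result.append(s[-1])
--     return ''.join(result)
-- ===== SOURCE B (Python) =====
-- def reversechar(s):
--     # Run-based scan: emit the first char of each maximal run, then jump past the run.
--     n = len(s)
--     out = []
--     i = 0
--     while i < n:
--         c = s[i]
--         out.append(c)
--         i += 1
--         while i < n and s[i] == c: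
--             i += 1
--     return ''.join(out)
-- ===== Notes on version B (the rewrite author's own statement) =====
-- stated objective: alternative
-- what changed: B scans maximal runs of equal characters and emits the first character of each run, jumping past the run (groupby-style), instead of A's index loop comparing each adjacent pair and keeping the last character of each run.
import Mathlib
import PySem

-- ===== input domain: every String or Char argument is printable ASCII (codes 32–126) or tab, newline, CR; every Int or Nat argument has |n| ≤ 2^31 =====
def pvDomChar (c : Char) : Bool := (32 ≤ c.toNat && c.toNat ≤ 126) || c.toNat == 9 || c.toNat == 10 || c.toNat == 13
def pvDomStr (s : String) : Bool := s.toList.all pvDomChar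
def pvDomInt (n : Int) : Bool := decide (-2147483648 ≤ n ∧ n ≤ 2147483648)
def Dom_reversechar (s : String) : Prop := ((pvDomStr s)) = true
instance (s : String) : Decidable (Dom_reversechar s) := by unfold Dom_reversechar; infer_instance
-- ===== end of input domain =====

-- B scans maximal runs of equal characters, emitting the first char of each run and jumping
-- past the run, instead of A's adjacent-pair index loop that keeps the last char of each run.
-- Both are total; the proof shows identical output on every string.

-- ===== PORT A =====
-- the while loop: i from 0 while i < len-1, appending s[i] when s[i] != s[i+1]
def reversecharLoopA (cs : List Char) (i : Nat) (acc : List Char) : List Char :=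
  if i < cs.length - 1 then
    if cs.getD i ' ' != cs.getD (i+1) ' ' then
      reversecharLoopA cs (i+1) (acc ++ [cs.getD i ' '])
    else
      reversecharLoopA cs (i+1) acc
  else acc
termination_by cs.length - 1 - i

def reversechar (s : String) : String :=
  let cs := s.toList
  if cs.length < 2 then s
  else String.ofList (reversecharLoopA cs 0 [] ++ [cs.getD (cs.length - 1) ' '])  -- result.append(s[-1])

-- ===== PORT B =====
-- inner while: advance j past the run of chars equal to c
def reversecharSkip (cs : List Char) (c : Char) (j : Nat) : Nat :=
  if h : j < cs.length then
    if cs.getD j ' ' == c then reversecharSkip cs c (j+1) else j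
  else j
termination_by cs.length - j

theorem reversecharSkip_ge (cs : List Char) (c : Char) (j : Nat) : j ≤ reversecharSkip cs c j := by
  fun_induction reversecharSkip cs c j <;> omega

-- outer while: emit s[i], then jump past its run
def reversecharLoopB (cs : List Char) (i : Nat) (acc : List Char) : List Char :=
  if _h : i < cs.length then
    reversecharLoopB cs (reversecharSkip cs (cs.getD i ' ') (i+1)) (acc ++ [cs.getD i ' '])
  else acc
termination_by cs.length - i
decreasing_by
  have := reversecharSkip_ge cs (cs.getD i ' ') (i+1)
  omega

def reversechar_alt (s : String) : String :=
  String.ofList (reversecharLoopB s.toList 0 [])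

-- ===== PRECONDITION & SPEC =====
def Spec_reversechar (s : String) (out : String) : Prop := out = reversechar_alt s
instance (s : String) (out : String) : Decidable (Spec_reversechar s out) := by unfold Spec_reversechar; infer_instance

-- ===== CLAIM (what is proved, stated in full; the proofs are below) =====
def Claim_equal_reversechar : Prop := ∀ (s : String), Dom_reversechar s → Spec_reversechar s (reversechar s)

-- ===== LEMMAS AND PROOFS =====

-- what A's loop body computes, structurally: keep a when the next char differs
def pvABody : List Char → List Char
  | a :: b :: rest => (if a != b then [a] else []) ++ pvABody (b :: rest)
  | _ => []

-- A's whole result (loop output plus the trailing s[-1]), structurally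
def pvF : List Char → List Char
  | [] => []
  | [a] => [a]
  | a :: b :: rest => (if a != b then [a] else []) ++ pvF (b :: rest)

-- B's result, structurally: first char of each run, drop the run
def pvG : List Char → List Char
  | [] => []
  | c :: rest => c :: pvG (rest.dropWhile (· == c))
termination_by l => l.length
decreasing_by
  have := List.length_dropWhile_le (· == c) rest
  simp; omega

theorem pvG_cons (c : Char) (rest : List Char) :
    pvG (c :: rest) = c :: pvG (rest.dropWhile (· == c)) := by
  rw [pvG.eq_def]

theorem pvLoopA_eq (cs : List Char) (i : Nat) (acc : List Char) :
    reversecharLoopA cs i acc = acc ++ pvABody (cs.drop i) := by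
  fun_induction reversecharLoopA cs i acc with
  | case1 i acc h hne ih =>
    rw [ih]
    have h1 : i < cs.length := by omega
    have h2 : i + 1 < cs.length := by omega
    rw [List.drop_eq_getElem_cons h1, List.drop_eq_getElem_cons h2, pvABody]
    simp [List.getD_eq_getElem?_getD, List.getElem?_eq_getElem h1, List.getElem?_eq_getElem h2] at hne ⊢
    simp [hne]
  | case2 i acc h heq ih =>
    rw [ih]
    have h1 : i < cs.length := by omega
    have h2 : i + 1 < cs.length := by omega
    rw [List.drop_eq_getElem_cons h1, List.drop_eq_getElem_cons h2, pvABody]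
    simp [List.getD_eq_getElem?_getD, List.getElem?_eq_getElem h1, List.getElem?_eq_getElem h2] at heq ⊢
    exact heq
  | case3 i acc h =>
    rcases Nat.lt_or_ge i cs.length with h' | h'
    · have hdr : cs.drop i = [cs[i]] := by
        have hi : i = cs.length - 1 := by omega
        rw [List.drop_eq_getElem_cons h']
        have : cs.drop (i + 1) = [] := List.drop_eq_nil_of_le (by omega)
        rw [this]
      rw [hdr]; simp [pvABody]
    · rw [List.drop_eq_nil_of_le h']; simp [pvABody]

theorem pvF_eq_aBody (a : Char) (rest : List Char) :
    pvF (a :: rest) = pvABody (a :: rest) ++ [(a :: rest).getD ((a :: rest).length - 1) ' '] := by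
  induction rest generalizing a with
  | nil => simp [pvF, pvABody]
  | cons b rest' ih =>
    rw [pvF, pvABody, ih b]
    simp [List.getD]
    rfl

-- key fact: keeping the last char of a run equals keeping its first char
theorem pvF_run (rest : List Char) (c : Char) :
    pvF (c :: rest) = c :: pvF (rest.dropWhile (· == c)) := by
  induction rest generalizing c with
  | nil => simp [pvF]
  | cons d rest' ih =>
    by_cases hdc : d = c
    · subst hdc
      rw [pvF]
      simp only [bne_self_eq_false, Bool.false_eq_true, if_false, List.nil_append]
      rw [ih d]
      simp [List.dropWhile]
    · have hf : (d == c) = false := by simp [hdc]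
      rw [pvF]
      have hne : (c != d) = true := by simp [bne]; exact fun h => hdc h.symm
      simp only [hne, if_true]
      simp [List.dropWhile, hf]

theorem pvG_eq_pvF (cs : List Char) : pvG cs = pvF cs := by
  fun_induction pvG cs with
  | case1 => simp [pvF]
  | case2 c rest ih => rw [pvF_run, ih]

theorem pvSkip_drop (cs : List Char) (c : Char) (j : Nat) :
    cs.drop (reversecharSkip cs c j) = (cs.drop j).dropWhile (· == c) := by
  fun_induction reversecharSkip cs c j with
  | case1 j h heq ih =>
    rw [ih, List.drop_eq_getElem_cons h, List.dropWhile]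
    simp [List.getD_eq_getElem?_getD, List.getElem?_eq_getElem h] at heq
    simp [heq]
  | case2 j h hne =>
    rw [List.drop_eq_getElem_cons h, List.dropWhile]
    simp [List.getD_eq_getElem?_getD, List.getElem?_eq_getElem h] at hne
    have hf : (cs[j] == c) = false := by simp [hne]
    simp only [hf]
  | case3 j h =>
    rw [List.drop_eq_nil_of_le (by omega)]
    simp

theorem pvLoopB_eq (cs : List Char) (i : Nat) (acc : List Char) :
    reversecharLoopB cs i acc = acc ++ pvG (cs.drop i) := by
  fun_induction reversecharLoopB cs i acc with
  | case1 i acc h ih =>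
    rw [ih, pvSkip_drop, List.drop_eq_getElem_cons h, pvG_cons]
    simp [List.getD_eq_getElem?_getD, List.getElem?_eq_getElem h]
  | case2 i acc h =>
    rw [List.drop_eq_nil_of_le (by omega)]
    simp [pvG]

-- ===== VERDICT (by name: the statement is the Claim_ definition above) =====
theorem reversechar_spec : Claim_equal_reversechar := by
  intro s _
  unfold Spec_reversechar reversechar reversechar_alt
  rw [pvLoopB_eq]
  simp only [List.drop_zero, List.nil_append, pvG_eq_pvF]
  split
  · next h =>
    have hid : pvF s.toList = s.toList := by
      rcases hcs : s.toList with _ | ⟨a, _ | ⟨b, t⟩⟩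
      · simp [pvF]
      · simp [pvF]
      · rw [hcs] at h; simp at h
    rw [hid, String.ofList_toList]
  · next h =>
    rw [pvLoopA_eq]
    simp only [List.drop_zero, List.nil_append]
    rcases hcs : s.toList with _ | ⟨a, rest⟩
    · rw [hcs] at h; simp at h
    · rw [pvF_eq_aBody]
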